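-- pv_equiv track=rewrite | github.com/NateB555/BRC-Public- | BRC_Dash_Public_Version.py | grant_calculator
-- ===== SOURCE A (Python) =====
-- def grant_calculator(solar_size_kWp, battery_size_kWh):
--     '''Calculates the grant amount for solar PV and battery installations
--     According to the SEAI (https://www.seai.ie/grants/home-energy-grants/individual-grants/solar-electricity-grant)
--     '''
--
--     grant_amount = 0
--     #Solar:
--     for i in range(1, int(solar_size_kWp)):
--         if  i <= 2:
--             grant_amount += 700
--         else:
--             grant_amount += 200
--
--     grant_amount = min(grant_amount, 1800)  #caps out at €1800
--
--     Battery_grant = False   #potentially use this to propose a battery grant?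
--     #Battery:
--     if Battery_grant == True:
--         return ''
--
--     return grant_amount
-- ===== SOURCE B (Python) =====
-- def grant_calculator(solar_size_kWp, battery_size_kWh):
--     """Closed-form tiered grant: 700 per tier-1 step (first 2), 200 per extra step, capped at 1800."""
--     terms = int(solar_size_kWp) - 1
--     if terms <= 0:
--         return 0
--     return min(700 * min(terms, 2) + 200 * max(terms - 2, 0), 1800)
-- ===== Notes on version B (the rewrite author's own statement) =====
-- stated objective: faster
-- what changed: Replaced the per-kWp accumulation loop with a closed-form count of tier-1 and tier-2 steps (min/max arithmetic) followed by the 1800 cap.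
import Mathlib
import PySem

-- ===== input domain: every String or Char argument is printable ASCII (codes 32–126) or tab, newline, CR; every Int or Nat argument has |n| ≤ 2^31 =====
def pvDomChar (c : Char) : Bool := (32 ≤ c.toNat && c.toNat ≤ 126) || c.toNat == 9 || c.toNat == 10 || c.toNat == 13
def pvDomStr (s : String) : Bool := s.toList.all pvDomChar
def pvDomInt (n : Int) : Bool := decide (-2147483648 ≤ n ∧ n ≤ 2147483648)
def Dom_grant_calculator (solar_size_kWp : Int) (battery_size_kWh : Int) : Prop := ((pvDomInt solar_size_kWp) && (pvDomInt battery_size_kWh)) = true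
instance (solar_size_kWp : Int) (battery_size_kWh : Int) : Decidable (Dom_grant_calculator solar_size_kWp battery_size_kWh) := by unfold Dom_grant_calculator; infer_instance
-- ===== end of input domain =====

-- B replaces A's per-kWp loop by closed-form min/max arithmetic (faster: O(1) vs O(n)).

-- ===== PORT A =====
-- Literal port: accumulate 700/200 over range(1, n), then cap at 1800.
-- (Battery_grant is the constant False in A, so its branch never fires and is not ported.)
def grant_calculator (solar_size_kWp : Int) (battery_size_kWh : Int) : Int :=
  let grant_amount : Int :=
    (PySem.List.pyRange 1 solar_size_kWp 1).foldl
      (fun g i => if i ≤ 2 then g + 700 else g + 200) 0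
  min grant_amount 1800

-- ===== PORT B =====
def grant_calculator_alt (solar_size_kWp : Int) (battery_size_kWh : Int) : Int :=
  let terms := solar_size_kWp - 1
  if terms ≤ 0 then 0
  else min (700 * min terms 2 + 200 * max (terms - 2) 0) 1800

-- ===== PRECONDITION & SPEC =====
def Spec_grant_calculator (solar_size_kWp : Int) (battery_size_kWh : Int) (out : Int) : Prop := out = grant_calculator_alt solar_size_kWp battery_size_kWh
instance (solar_size_kWp : Int) (battery_size_kWh : Int) (out : Int) : Decidable (Spec_grant_calculator solar_size_kWp battery_size_kWh out) := by unfold Spec_grant_calculator; infer_instance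

-- ===== CLAIM (what is proved, stated in full; the proofs are below) =====
def Claim_equal_grant_calculator : Prop := ∀ (solar_size_kWp : Int) (battery_size_kWh : Int), Dom_grant_calculator solar_size_kWp battery_size_kWh → Spec_grant_calculator solar_size_kWp battery_size_kWh (grant_calculator solar_size_kWp battery_size_kWh)

-- ===== LEMMAS AND PROOFS =====

lemma grant_foldl_range (m : Nat) :
    (List.range m).foldl (fun (g : Int) (k : Nat) => if 1 + (k : Int) ≤ 2 then g + 700 else g + 200) 0
      = 700 * min (m : Int) 2 + 200 * max ((m : Int) - 2) 0 := by
  induction m with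
  | zero => simp
  | succ m ih =>
    rw [List.range_succ, List.foldl_append]
    simp only [List.foldl_cons, List.foldl_nil, ih]
    push_cast
    split_ifs with h <;> omega

lemma grant_sum_closed (n : Int) :
    (PySem.List.pyRange 1 n 1).foldl (fun g i => if i ≤ 2 then g + 700 else g + 200) 0
      = 700 * min (max (n - 1) 0) 2 + 200 * max (n - 3) 0 := by
  rw [PySem.List.pyRange_one, List.foldl_map]
  rw [grant_foldl_range (n - 1).toNat]
  rcases le_or_gt n 1 with h | h
  · rw [Int.toNat_of_nonpos (by omega)]
    simp; omega
  · rw [Int.toNat_of_nonneg (by omega)]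
    omega

-- ===== VERDICT (by name: the statement is the Claim_ definition above) =====
theorem grant_calculator_spec : Claim_equal_grant_calculator := by
  intro n b _hdom
  unfold Spec_grant_calculator grant_calculator grant_calculator_alt
  simp only [grant_sum_closed]
  split_ifs with h <;> omega
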